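-- pv_equiv track=rewrite | github.com/arifkhan1990/Competitive-Programming | Codingninjas/Contest/Weekend Contest 99/How Many Are Anagrams?.py | howManyAreAnagrams
-- ===== SOURCE A (Python) =====
-- from typing import List
--
-- def howManyAreAnagrams(n: int, m: int, a: List[str], b: List[str]) -> List[int]:
--     ans = [0]*m
--     res = {}
--     a1 = [""]*n
--     b1 = [""]*m
--
--     for i in range(n):
--         x = ''.join(sorted(a[i]))
--         a1[i] = x
--
--     for i in range(m):
--         x = ''.join(sorted(b[i]))
--         b1[i] = x
--
--     for i in range(m):
--         for j in a1:
--             if b1[i] == j: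
--                 ans[i] += 1
--
--     return ans
-- ===== SOURCE B (Python) =====
-- from typing import List
--
-- def howManyAreAnagrams(n: int, m: int, a: List[str], b: List[str]) -> List[int]:
--     freq = {}
--     for i in range(n):
--         key = ''.join(sorted(a[i]))
--         freq[key] = freq.get(key, 0) + 1
--     out = []
--     for i in range(m):
--         out.append(freq.get(''.join(sorted(b[i])), 0))
--     return out
-- ===== Notes on version B (the rewrite author's own statement) =====
-- stated objective: faster
-- what changed: Replaces the per-query linear scan over all n signatures with a hash-map frequency table built once, so each b-query is a single dictionary lookup.
import Mathlib
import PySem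

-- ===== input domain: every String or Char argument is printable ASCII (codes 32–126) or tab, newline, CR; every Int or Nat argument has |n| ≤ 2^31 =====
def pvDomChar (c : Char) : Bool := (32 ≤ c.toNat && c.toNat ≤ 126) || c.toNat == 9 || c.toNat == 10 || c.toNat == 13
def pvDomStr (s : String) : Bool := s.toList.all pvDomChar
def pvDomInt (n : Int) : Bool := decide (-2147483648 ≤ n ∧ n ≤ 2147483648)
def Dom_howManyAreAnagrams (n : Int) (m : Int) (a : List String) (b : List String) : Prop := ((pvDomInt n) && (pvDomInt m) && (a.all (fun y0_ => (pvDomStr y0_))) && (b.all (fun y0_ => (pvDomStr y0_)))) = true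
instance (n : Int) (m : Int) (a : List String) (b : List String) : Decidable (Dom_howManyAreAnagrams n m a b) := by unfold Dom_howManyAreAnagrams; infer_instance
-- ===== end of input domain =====

-- B replaces A's per-query linear scan over all n signatures with a dict frequency table
-- built once, so each b-query is a single lookup (objective: faster).


-- ''.join(sorted(s)) — the anagram signature, computed verbatim by both Pythons
def pvSig (s : String) : String := String.mk (PySem.List.sorted s.toList (fun c => c) false)

-- ===== PORT A =====
def howManyAreAnagrams (n : Int) (m : Int) (a : List String) (b : List String) : List Int :=
  let ans : List Int := List.replicate m.toNat 0
  let a1 : List String := List.replicate n.toNat ""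
  let b1 : List String := List.replicate m.toNat ""
  let a1 := (PySem.List.pyRange 0 n 1).foldl
      (fun a1 i => PySem.List.pySetD a1 i (pvSig (PySem.List.pyGetD a i ""))) a1
  let b1 := (PySem.List.pyRange 0 m 1).foldl
      (fun b1 i => PySem.List.pySetD b1 i (pvSig (PySem.List.pyGetD b i ""))) b1
  let ans := (PySem.List.pyRange 0 m 1).foldl
      (fun ans i => a1.foldl
        (fun ans j => if PySem.List.pyGetD b1 i "" == j
                      then PySem.List.pySetD ans i (PySem.List.pyGetD ans i 0 + 1)
                      else ans) ans) ans
  ans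

-- ===== PORT B =====
def howManyAreAnagrams_alt (n : Int) (m : Int) (a : List String) (b : List String) : List Int :=
  let freq : PySem.Dict String Int := PySem.Dict.empty
  let freq := (PySem.List.pyRange 0 n 1).foldl
      (fun d i =>
        let key := pvSig (PySem.List.pyGetD a i "")
        d.insert key (d.getD key 0 + 1)) freq
  (PySem.List.pyRange 0 m 1).foldl
      (fun out i => out ++ [freq.getD (pvSig (PySem.List.pyGetD b i "")) 0]) []

-- ===== PRECONDITION & SPEC =====
-- A indexes a[i] for every i < n and b[i] for every i < m; for n > len(a) or m > len(b) it raises IndexError.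
def Pre_howManyAreAnagrams (n : Int) (m : Int) (a : List String) (b : List String) : Prop :=
  n ≤ (a.length : Int) ∧ m ≤ (b.length : Int)
instance (n : Int) (m : Int) (a : List String) (b : List String) : Decidable (Pre_howManyAreAnagrams n m a b) := by unfold Pre_howManyAreAnagrams; infer_instance
def pvWitness_howManyAreAnagrams : Int × Int × List String × List String := (1, 1, ["ab"], ["ba"])

def Spec_howManyAreAnagrams (n : Int) (m : Int) (a : List String) (b : List String) (out : List Int) : Prop := out = howManyAreAnagrams_alt n m a b
instance (n : Int) (m : Int) (a : List String) (b : List String) (out : List Int) : Decidable (Spec_howManyAreAnagrams n m a b out) := by unfold Spec_howManyAreAnagrams; infer_instance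

-- ===== CLAIM (what is proved, stated in full; the proofs are below) =====
def Claim_equal_howManyAreAnagrams : Prop := ∀ (n : Int) (m : Int) (a : List String) (b : List String), Dom_howManyAreAnagrams n m a b → Pre_howManyAreAnagrams n m a b → Spec_howManyAreAnagrams n m a b (howManyAreAnagrams n m a b)

-- ===== LEMMAS AND PROOFS =====

-- the first N entries of xs read off by index
lemma pv_range_getD_eq_take {α : Type} (xs : List α) (d : α) (N : Nat) (hN : N ≤ xs.length) :
    (List.range N).map (fun k => xs.getD k d) = xs.take N := by
  apply List.ext_getElem
  · simp [Nat.min_eq_left hN]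
  · intro i h1 h2
    simp at h1
    simp [List.getD, List.getElem?_eq_getElem (show i < xs.length by omega)]

-- writing g k at every index k < N leaves map g (range N) ++ the untouched tail
lemma pv_foldl_set_range {α : Type} (g : Nat → α) :
    ∀ (N : Nat) (init : List α), N ≤ init.length →
      (List.range N).foldl (fun l k => l.set k (g k)) init
        = (List.range N).map g ++ init.drop N := by
  intro N
  induction N with
  | zero => simp
  | succ N ih =>
    intro init hlen
    rw [List.range_succ, List.foldl_append, List.foldl_cons, List.foldl_nil,
        ih init (by omega)]
    have hdrop : init.drop N = init[N] :: init.drop (N + 1) :=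
      (List.getElem_cons_drop (by omega)).symm
    have hlm : (List.map g (List.range N)).length = N := by simp
    rw [hdrop, List.set_append_right _ _ (by omega), List.map_append, hlm]
    simp
    rw [hdrop]
    rfl

-- A's index-assignment loops build exactly the list of signatures of the first N entries
lemma pv_build_loop (xs : List String) (n : Int) (hn : n ≤ (xs.length : Int)) :
    (PySem.List.pyRange 0 n 1).foldl
        (fun l i => PySem.List.pySetD l i (pvSig (PySem.List.pyGetD xs i ""))) (List.replicate n.toNat "")
      = (xs.take n.toNat).map pvSig := by
  rw [PySem.List.pyRange_zero, List.foldl_map]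
  simp only [PySem.List.pySetD_natCast, PySem.List.pyGetD_natCast]
  have h := pv_foldl_set_range (fun k => pvSig (xs.getD k "")) n.toNat
      (List.replicate n.toNat "") (by simp)
  simp only at h
  rw [h]
  have hmm : List.map (fun k => pvSig (xs.getD k "")) (List.range n.toNat)
      = List.map pvSig ((List.range n.toNat).map (fun k => xs.getD k "")) := by
    rw [List.map_map]; rfl
  rw [hmm, pv_range_getD_eq_take xs "" n.toNat (by omega)]
  simp

-- counting pass: scanning cs and bumping slot k on each match adds the match count to slot k
lemma pv_inner_count (x : String) (k : Nat) :
    ∀ (cs : List String) (ans : List Int), k < ans.length →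
      cs.foldl (fun ans j => if x == j
            then PySem.List.pySetD ans (k : Int) (PySem.List.pyGetD ans (k : Int) 0 + 1)
            else ans) ans
        = ans.set k (ans.getD k 0 + (cs.count x : Int)) := by
  intro cs
  induction cs with
  | nil =>
    intro ans h
    simp [List.getD, List.getElem?_eq_getElem h, List.set_getElem_self]
  | cons c rest ih =>
    intro ans h
    simp only [List.foldl_cons]
    by_cases hc : x = c
    · rw [if_pos (by simp [hc]), PySem.List.pySetD_natCast, PySem.List.pyGetD_natCast,
          ih _ (by simpa using h)]
      rw [List.set_set]
      have hg : (ans.set k (ans.getD k 0 + 1)).getD k 0 = ans.getD k 0 + 1 := by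
        simp [List.getD, List.getElem?_set_self', List.getElem?_eq_getElem h]
      rw [hg]
      have hcnt : rest.count x + 1 = (c :: rest).count x := by
        simp [hc]
      rw [← hcnt]
      push_cast
      ring_nf
    · rw [if_neg (by simp [hc]), ih ans h]
      have hcnt : rest.count x = (c :: rest).count x := by
        simp [Ne.symm hc]
      rw [hcnt]

-- A's outer double loop: slot k ends at init[k] + (count of b1[k] among a1)
lemma pv_outer_loop (a1 b1 : List String) :
    ∀ (M : Nat) (init : List Int), M ≤ init.length →
      (List.range M).foldl
        (fun (ans : List Int) (k : Nat) => a1.foldl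
          (fun ans j => if PySem.List.pyGetD b1 (k : Int) "" == j
              then PySem.List.pySetD ans (k : Int) (PySem.List.pyGetD ans (k : Int) 0 + 1)
              else ans) ans) init
        = (List.range M).map (fun k => init.getD k 0 + (a1.count (b1.getD k "") : Int))
            ++ init.drop M := by
  intro M
  induction M with
  | zero => simp
  | succ M ih =>
    intro init hlen
    rw [List.range_succ, List.foldl_append, List.foldl_cons, List.foldl_nil,
        ih init (by omega)]
    rw [PySem.List.pyGetD_natCast b1 M ""]
    rw [pv_inner_count (b1.getD M "") M _ _ (by simp; omega)]
    have hdrop : init.drop M = init[M] :: init.drop (M + 1) :=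
      (List.getElem_cons_drop (by omega)).symm
    have hlm : (List.map (fun k => init.getD k 0 + (a1.count (b1.getD k "") : Int))
        (List.range M)).length = M := by simp
    have hget : ((List.range M).map (fun k => init.getD k 0 + (a1.count (b1.getD k "") : Int))
        ++ init.drop M).getD M 0 = init.getD M 0 := by
      rw [hdrop, List.getD, List.getElem?_append_right (by omega), hlm]
      simp [List.getD, List.getElem?_eq_getElem (show M < init.length by omega)]
    rw [hget, hdrop, List.set_append_right _ _ (by omega), List.map_append, hlm]
    simp
    rw [hdrop]
    rfl

-- ===== VERDICT (by name: the statement is the Claim_ definition above) =====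
theorem howManyAreAnagrams_spec : Claim_equal_howManyAreAnagrams := by
  intro n m a b _ hpre
  obtain ⟨hn, hm⟩ := hpre
  unfold Spec_howManyAreAnagrams howManyAreAnagrams howManyAreAnagrams_alt
  simp only []
  rw [pv_build_loop a n hn, pv_build_loop b m hm]
  -- A side: outer loop becomes a map of counts over range m
  rw [PySem.List.pyRange_zero m, List.foldl_map]
  rw [pv_outer_loop ((a.take n.toNat).map pvSig) ((b.take m.toNat).map pvSig) m.toNat
        (List.replicate m.toNat 0) (by simp)]
  -- B side: freq is the insert-fold over the a-signature list, the output loop is a map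
  rw [PySem.List.pyRange_zero n, List.foldl_map]
  simp only [PySem.List.pyGetD_natCast]
  have hfreq : List.foldl
        (fun (d : PySem.Dict String Int) i =>
          d.insert (pvSig (PySem.List.pyGetD a i ""))
            (d.getD (pvSig (PySem.List.pyGetD a i "")) 0 + 1))
        PySem.Dict.empty ((List.range n.toNat).map (fun k => ((k : Nat) : Int)))
      = (((a.take n.toNat).map pvSig).foldl
        (fun d x => d.insert x (d.getD x 0 + 1)) PySem.Dict.empty) := by
    rw [List.foldl_map]
    simp only [PySem.List.pyGetD_natCast]
    have hmm : (a.take n.toNat).map pvSig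
        = (List.range n.toNat).map (fun k => pvSig (a.getD k "")) := by
      have hcomp : List.map (fun k => pvSig (a.getD k "")) (List.range n.toNat)
          = List.map pvSig ((List.range n.toNat).map (fun k => a.getD k "")) := by
        rw [List.map_map]; rfl
      rw [hcomp, pv_range_getD_eq_take a "" n.toNat (by omega)]
    rw [hmm, List.foldl_map]
  rw [hfreq]
  rw [PySem.List.foldl_append_singleton_eq_map]
  rw [List.nil_append]
  have hdropz : (List.replicate m.toNat (0 : Int)).drop m.toNat = [] := by simp
  rw [hdropz, List.append_nil]
  apply List.map_congr_left
  intro k hk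
  rw [List.mem_range] at hk
  rw [PySem.Dict.getD_foldl_insert_add_one]
  have hbk : ((b.take m.toNat).map pvSig).getD k "" = pvSig (b.getD k "") := by
    rw [← pv_range_getD_eq_take b "" m.toNat (by omega), List.map_map]
    simp [List.getD, List.getElem?_map, List.getElem?_range hk]
  rw [hbk]
  have hrep : (List.replicate m.toNat (0 : Int)).getD k 0 = 0 := by
    simp [List.getD, List.getElem?_eq_getElem (show k < (List.replicate m.toNat (0:Int)).length by simpa using hk)]
  rw [hrep]
  simp [PySem.Dict.getD, PySem.Dict.get?, PySem.Dict.empty]
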